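-- pv_equiv track=rewrite | github.com/jmac-cornelis/agent-workforce | agents/drucker/jira_reporting.py | compute_breakdowns
-- ===== SOURCE A (Python) =====
-- from collections import Counter
-- from typing import Any, Dict, List, Optional
--
-- def compute_breakdowns(tickets: List[Dict[str, Any]]) -> Dict[str, Any]:
--     '''Compute status/type/priority/assignee breakdowns from normalized tickets.'''
--     status_counter: Counter = Counter()
--     type_counter: Counter = Counter()
--     priority_counter: Counter = Counter()
--     assignee_counter: Counter = Counter()
--
--     for t in tickets:
--         status_counter[t.get('status', '')] += 1
--         type_counter[t.get('issue_type', '')] += 1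
--         priority_counter[t.get('priority', '')] += 1
--         assignee_counter[t.get('assignee', '') or 'Unassigned'] += 1
--
--     return {
--         'by_status': dict(status_counter),
--         'by_type': dict(type_counter),
--         'by_priority': dict(priority_counter),
--         'by_assignee': dict(assignee_counter),
--     }
-- ===== SOURCE B (Python) =====
-- from typing import Any, Dict, List, Optional
--
-- def compute_breakdowns(tickets: List[Dict[str, Any]]) -> Dict[str, Any]:
--     '''Compute status/type/priority/assignee breakdowns from normalized tickets.'''
--     def breakdown(values: list) -> dict:
--         # distinct values in first-occurrence order, then count each with a full scan
--         return {v: values.count(v) for v in dict.fromkeys(values)}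
--     return {
--         'by_status': breakdown([t.get('status', '') for t in tickets]),
--         'by_type': breakdown([t.get('issue_type', '') for t in tickets]),
--         'by_priority': breakdown([t.get('priority', '') for t in tickets]),
--         'by_assignee': breakdown([(t.get('assignee', '') or 'Unassigned') for t in tickets]),
--     }
-- ===== Notes on version B (the rewrite author's own statement) =====
-- stated objective: alternative
-- what changed: Replaces incremental Counter accumulation with a dedup-then-count strategy: per field it extracts the value list, takes the distinct values in first-occurrence order via dict.fromkeys, and computes each tally with a separate list.count scan, so no counter dictionary is ever updated.
import Mathlib
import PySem

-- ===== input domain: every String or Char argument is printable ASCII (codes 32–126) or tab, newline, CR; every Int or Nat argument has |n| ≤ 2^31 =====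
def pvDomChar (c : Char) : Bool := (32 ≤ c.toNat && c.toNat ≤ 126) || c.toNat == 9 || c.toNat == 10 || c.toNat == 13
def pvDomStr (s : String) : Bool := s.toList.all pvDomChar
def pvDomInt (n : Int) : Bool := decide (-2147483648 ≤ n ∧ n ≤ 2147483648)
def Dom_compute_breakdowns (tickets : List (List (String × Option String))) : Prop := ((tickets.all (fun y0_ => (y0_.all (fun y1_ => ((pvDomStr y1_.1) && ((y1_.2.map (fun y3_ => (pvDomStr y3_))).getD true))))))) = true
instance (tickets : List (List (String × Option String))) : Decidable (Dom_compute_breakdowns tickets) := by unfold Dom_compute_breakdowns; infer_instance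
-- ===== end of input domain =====

-- B replaces A's incremental Counter accumulation by a dedup-then-count strategy:
-- per field, distinct values in first-occurrence order, each tallied by a full list.count scan
-- (objective: alternative; not faster).


-- ===== PORT A =====
-- t.get(key, '') for a dict[str, Optional[str]]: absent key → '' (a stored None is excluded by Pre_)
def pvGetFld (t : List (String × Option String)) (k : String) : String :=
  ((PySem.Dict.mk t).get? k).getD (some "") |>.getD ""

-- t.get('assignee', '') or 'Unassigned'  (absent, None and '' are all falsy)
def pvAssignee (t : List (String × Option String)) : String :=
  match (PySem.Dict.mk t).get? "assignee" with
  | some (some s) => if s = "" then "Unassigned" else s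
  | _ => "Unassigned"

def compute_breakdowns (tickets : List (List (String × Option String))) : List (String × List (String × Int)) :=
  let r := tickets.foldl
    (fun (acc : PySem.Dict String Int × PySem.Dict String Int × PySem.Dict String Int × PySem.Dict String Int) t =>
      (acc.1.modify (pvGetFld t "status") 0 (· + 1),
       acc.2.1.modify (pvGetFld t "issue_type") 0 (· + 1),
       acc.2.2.1.modify (pvGetFld t "priority") 0 (· + 1),
       acc.2.2.2.modify (pvAssignee t) 0 (· + 1)))
    (PySem.Dict.empty, PySem.Dict.empty, PySem.Dict.empty, PySem.Dict.empty)
  [("by_status", r.1.items), ("by_type", r.2.1.items),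
   ("by_priority", r.2.2.1.items), ("by_assignee", r.2.2.2.items)]

-- ===== PORT B =====
-- {v: values.count(v) for v in dict.fromkeys(values)}
def pvBreakdown (vs : List String) : List (String × Int) :=
  (PySem.List.dedup vs).map (fun v => (v, (PySem.List.count vs v : Int)))

def compute_breakdowns_alt (tickets : List (List (String × Option String))) : List (String × List (String × Int)) :=
  [("by_status", pvBreakdown (tickets.map (fun t => pvGetFld t "status"))),
   ("by_type", pvBreakdown (tickets.map (fun t => pvGetFld t "issue_type"))),
   ("by_priority", pvBreakdown (tickets.map (fun t => pvGetFld t "priority"))),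
   ("by_assignee", pvBreakdown (tickets.map pvAssignee))]

-- ===== PRECONDITION & SPEC =====
-- Pre_ excludes tickets that store None under 'status'/'issue_type'/'priority': there A (and B)
-- return a dict keyed by None, which is not a value of the declared dict[str, int] type.
def Pre_compute_breakdowns (tickets : List (List (String × Option String))) : Prop :=
  ∀ t ∈ tickets, (PySem.Dict.mk t).get? "status" ≠ some none ∧
    (PySem.Dict.mk t).get? "issue_type" ≠ some none ∧
    (PySem.Dict.mk t).get? "priority" ≠ some none
instance (tickets : List (List (String × Option String))) : Decidable (Pre_compute_breakdowns tickets) := by unfold Pre_compute_breakdowns; infer_instance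

def pvWitness_compute_breakdowns : (List (List (String × Option String))) :=
  [[("status", some "Open"), ("assignee", none)], [("status", some "Done"), ("priority", some "High")]]

def Spec_compute_breakdowns (tickets : List (List (String × Option String))) (out : List (String × List (String × Int))) : Prop := out = compute_breakdowns_alt tickets
instance (tickets : List (List (String × Option String))) (out : List (String × List (String × Int))) : Decidable (Spec_compute_breakdowns tickets out) := by unfold Spec_compute_breakdowns; infer_instance

-- ===== CLAIM (what is proved, stated in full; the proofs are below) =====
def Claim_equal_compute_breakdowns : Prop := ∀ (tickets : List (List (String × Option String))), Dom_compute_breakdowns tickets → Pre_compute_breakdowns tickets → Spec_compute_breakdowns tickets (compute_breakdowns tickets)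

-- ===== LEMMAS AND PROOFS =====
-- A's one pass with four accumulators is the quadruple of four independent counting passes.
theorem foldl_quad_split (l : List (List (String × Option String)))
    (f1 f2 f3 f4 : List (String × Option String) → String)
    (s t p a : PySem.Dict String Int) :
    l.foldl (fun acc x =>
        (acc.1.modify (f1 x) 0 (· + 1), acc.2.1.modify (f2 x) 0 (· + 1),
         acc.2.2.1.modify (f3 x) 0 (· + 1), acc.2.2.2.modify (f4 x) 0 (· + 1)))
      (s, t, p, a) =
    (l.foldl (fun d x => d.modify (f1 x) 0 (· + 1)) s,
     l.foldl (fun d x => d.modify (f2 x) 0 (· + 1)) t,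
     l.foldl (fun d x => d.modify (f3 x) 0 (· + 1)) p,
     l.foldl (fun d x => d.modify (f4 x) 0 (· + 1)) a) := by
  induction l generalizing s t p a with
  | nil => rfl
  | cons x xs ih => simp [List.foldl_cons, ih]

-- one accumulator pass over field f = Counter of the mapped value list, whose items are B's dedup-then-count
theorem foldl_field_eq_pvBreakdown (l : List (List (String × Option String)))
    (f : List (String × Option String) → String) :
    (l.foldl (fun d x => d.modify (f x) 0 (· + 1)) PySem.Dict.empty).items =
      pvBreakdown (l.map f) := by
  have h : l.foldl (fun d x => d.modify (f x) 0 (· + 1)) PySem.Dict.empty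
      = PySem.Dict.counter (l.map f) := by
    rw [PySem.Dict.counter_eq_foldl, List.foldl_map]
  rw [h, PySem.Dict.items_counter, pvBreakdown, PySem.List.dedup_eq_ofList]
  simp [PySem.List.count_eq]

-- ===== VERDICT (by name: the statement is the Claim_ definition above) =====
theorem compute_breakdowns_spec : Claim_equal_compute_breakdowns := by
  intro tickets _ _
  show compute_breakdowns tickets = compute_breakdowns_alt tickets
  unfold compute_breakdowns compute_breakdowns_alt
  simp only [foldl_quad_split, foldl_field_eq_pvBreakdown]
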